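-- pv_equiv track=rewrite | github.com/Camilo-6/SeptimoSemestre | Cr/Tareas/Tarea2/Ejercicio5/poli.py | suma_poli
-- ===== SOURCE A (Python) =====
-- def suma_poli(f, g, p_n):
--     if f == [0]:
--         return g
--     if g == [0]:
--         return f
--     l_1 = len(f)
--     l_2 = len(g)
--     if l_1 < l_2:
--         f = [0] * (l_2 - l_1) + f
--     elif l_2 < l_1:
--         g = [0] * (l_1 - l_2) + g
--     resultado = [(f[i] + g[i]) % p_n for i in range(max(l_1, l_2))]
--     while resultado and resultado[0] == 0:
--         resultado.pop(0)
--     if resultado == []: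
--         resultado = [0]
--     return resultado
-- ===== SOURCE B (Python) =====
-- def suma_poli(f, g, p_n):
--     if f == [0]:
--         return g
--     if g == [0]:
--         return f
--     # walk both lists from the end with two descending pointers: no padding,
--     # builds the sum low-order-first
--     low = []
--     i, j = len(f) - 1, len(g) - 1
--     while i >= 0 or j >= 0:
--         a = f[i] if i >= 0 else 0
--         b = g[j] if j >= 0 else 0
--         low.append((a + b) % p_n)
--         i -= 1
--         j -= 1
--     # one scan for the last nonzero coefficient, one slice, one reversal
--     k = 0
--     for idx, c in enumerate(low):
--         if c != 0:
--             k = idx + 1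
--     if k == 0:
--         return [0]
--     return low[:k][::-1]
-- ===== Notes on version B (the rewrite author's own statement) =====
-- stated objective: alternative
-- what changed: Instead of left-padding the shorter list with zeros and indexing both via range(max), B walks both lists from the end with two descending pointers building the sum low-order-first, then trims with a single last-nonzero scan and one slice instead of A's repeated pop(0) loop.
import Mathlib
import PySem

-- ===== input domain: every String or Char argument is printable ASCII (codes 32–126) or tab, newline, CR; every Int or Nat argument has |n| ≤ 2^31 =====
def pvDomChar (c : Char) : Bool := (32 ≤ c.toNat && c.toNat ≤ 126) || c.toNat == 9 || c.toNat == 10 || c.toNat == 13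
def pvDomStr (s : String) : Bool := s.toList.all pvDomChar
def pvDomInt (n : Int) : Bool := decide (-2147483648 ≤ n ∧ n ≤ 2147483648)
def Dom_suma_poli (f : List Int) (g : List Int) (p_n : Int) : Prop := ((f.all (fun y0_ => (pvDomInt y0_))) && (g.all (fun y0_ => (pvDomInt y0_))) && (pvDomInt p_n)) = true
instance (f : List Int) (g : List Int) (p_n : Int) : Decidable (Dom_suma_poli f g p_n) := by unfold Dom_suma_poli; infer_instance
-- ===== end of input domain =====

-- B replaces A's pad-then-index addition and pop(0) trim loop by a descending
-- two-pointer pass building the sum low-order-first plus a single last-nonzero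
-- scan and one slice (objective: alternative decomposition).

-- ===== PORT A =====
def suma_poli (f : List Int) (g : List Int) (p_n : Int) : List Int :=
  if f = [0] then g
  else if g = [0] then f
  else
    let l1 := f.length
    let l2 := g.length
    let f' := if l1 < l2 then List.replicate (l2 - l1) (0 : Int) ++ f else f
    let g' := if l2 < l1 then List.replicate (l1 - l2) (0 : Int) ++ g else g
    -- [(f[i] + g[i]) % p_n for i in range(max(l_1, l_2))]; every i is in range
    let resultado := (List.range (max l1 l2)).map
      (fun i => PySem.Int.mod (f'.getD i 0 + g'.getD i 0) p_n)
    -- while resultado and resultado[0] == 0: resultado.pop(0)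
    let trimmed := resultado.dropWhile (fun c => c == 0)
    if trimmed = [] then [0] else trimmed

-- ===== PORT B =====
-- the descending-index while loop of Source B walks f and g from the last element
-- backwards; ported exactly as structural recursion on the reversed lists
def sumaLow : List Int → List Int → Int → List Int
  | [], [], _ => []
  | a :: as, [], p => PySem.Int.mod (a + 0) p :: sumaLow as [] p
  | [], b :: bs, p => PySem.Int.mod (0 + b) p :: sumaLow [] bs p
  | a :: as, b :: bs, p => PySem.Int.mod (a + b) p :: sumaLow as bs p

-- k = 0; for idx, c in enumerate(low): if c != 0: k = idx + 1
def lastNZ (low : List Int) : Int :=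
  (PySem.List.enumerate low).foldl (fun k ic => if ic.2 ≠ 0 then ic.1 + 1 else k) 0

def suma_poli_alt (f : List Int) (g : List Int) (p_n : Int) : List Int :=
  if f = [0] then g
  else if g = [0] then f
  else
    let low := sumaLow f.reverse g.reverse p_n
    let k := lastNZ low
    if k = 0 then [0] else (low.take k.toNat).reverse   -- low[:k][::-1], k ≥ 0

-- ===== PRECONDITION & SPEC =====
-- Pre_ excludes exactly the inputs where Python A raises ZeroDivisionError:
-- p_n = 0 while neither identity short-circuit fires and some coefficient is summed.
def Pre_suma_poli (f : List Int) (g : List Int) (p_n : Int) : Prop :=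
  f = [0] ∨ g = [0] ∨ p_n ≠ 0 ∨ (f = [] ∧ g = [])
instance (f : List Int) (g : List Int) (p_n : Int) : Decidable (Pre_suma_poli f g p_n) := by
  unfold Pre_suma_poli; infer_instance

def pvWitness_suma_poli : List Int × List Int × Int := ([1, 2], [3], 5)

def Spec_suma_poli (f : List Int) (g : List Int) (p_n : Int) (out : List Int) : Prop := out = suma_poli_alt f g p_n
instance (f : List Int) (g : List Int) (p_n : Int) (out : List Int) : Decidable (Spec_suma_poli f g p_n out) := by unfold Spec_suma_poli; infer_instance

-- ===== CLAIM (what is proved, stated in full; the proofs are below) =====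
def Claim_equal_suma_poli : Prop := ∀ (f : List Int) (g : List Int) (p_n : Int), Dom_suma_poli f g p_n → Pre_suma_poli f g p_n → Spec_suma_poli f g p_n (suma_poli f g p_n)

-- ===== LEMMAS AND PROOFS =====

-- A's index comprehension over equal-length lists is a zipWith
theorem mapRange_eq_zipWith (p : Int) :
    ∀ (F G : List Int), F.length = G.length →
      (List.range F.length).map (fun i => PySem.Int.mod (F.getD i 0 + G.getD i 0) p)
        = List.zipWith (fun a b => PySem.Int.mod (a + b) p) F G := by
  intro F
  induction F with
  | nil => intro G h; simp
  | cons x xs ih =>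
    intro G h
    cases G with
    | nil => simp at h
    | cons y ys =>
      simp only [List.length_cons, List.range_succ_eq_map, List.map_cons, List.map_map]
      simp only [List.getD_cons_zero, List.getD_cons_succ, List.zipWith_cons_cons]
      refine congrArg _ ?_
      have := ih ys (by simpa using h)
      simpa [Function.comp] using this

theorem zipWith_replicate_right (p : Int) :
    ∀ (xs : List Int),
      List.zipWith (fun a b => PySem.Int.mod (a + b) p) xs (List.replicate xs.length 0)
        = xs.map (fun a => PySem.Int.mod (a + 0) p) := by
  intro xs; induction xs with
  | nil => rfl
  | cons x xs ih => simp [List.replicate_succ, ih]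

theorem zipWith_replicate_left (p : Int) :
    ∀ (ys : List Int),
      List.zipWith (fun a b => PySem.Int.mod (a + b) p) (List.replicate ys.length 0) ys
        = ys.map (fun b => PySem.Int.mod (0 + b) p) := by
  intro ys; induction ys with
  | nil => rfl
  | cons y ys ih => simp [List.replicate_succ, ih]

theorem sumaLow_nil_right (p : Int) :
    ∀ (xs : List Int), sumaLow xs [] p = xs.map (fun a => PySem.Int.mod (a + 0) p) := by
  intro xs; induction xs with
  | nil => simp [sumaLow]
  | cons x xs ih => simp [sumaLow, ih]

theorem sumaLow_nil_left (p : Int) :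
    ∀ (ys : List Int), sumaLow [] ys p = ys.map (fun b => PySem.Int.mod (0 + b) p) := by
  intro ys; induction ys with
  | nil => simp [sumaLow]
  | cons y ys ih => simp [sumaLow, ih]

-- B's two-pointer pass = zipWith over right-zero-padded lists
theorem sumaLow_eq_zipWith_pad (p : Int) :
    ∀ (xs ys : List Int),
      sumaLow xs ys p
        = List.zipWith (fun a b => PySem.Int.mod (a + b) p)
            (xs ++ List.replicate (max xs.length ys.length - xs.length) 0)
            (ys ++ List.replicate (max xs.length ys.length - ys.length) 0) := by
  intro xs
  induction xs with
  | nil =>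
    intro ys
    simp [sumaLow_nil_left, zipWith_replicate_left]
  | cons x xs ih =>
    intro ys
    cases ys with
    | nil =>
      have h1 : max (x :: xs).length ([] : List Int).length = xs.length + 1 := by simp
      simp [sumaLow_nil_right, h1, List.replicate_succ, zipWith_replicate_right, sumaLow]
    | cons y ys =>
      have h1 : max (x :: xs).length (y :: ys).length - (x :: xs).length
          = max xs.length ys.length - xs.length := by simp only [List.length_cons]; omega
      have h2 : max (x :: xs).length (y :: ys).length - (y :: ys).length
          = max xs.length ys.length - ys.length := by simp only [List.length_cons]; omega
      simp only [sumaLow, h1, h2, List.cons_append, List.zipWith_cons_cons]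
      exact congrArg _ (ih ys)

theorem lastNZ_concat (xs : List Int) (x : Int) :
    lastNZ (xs ++ [x]) = if x ≠ 0 then (xs.length : Int) + 1 else lastNZ xs := by
  unfold lastNZ
  rw [PySem.List.enumerate_append, List.foldl_append]
  simp [PySem.List.enumerate_cons]

theorem lastNZ_nonneg_le (xs : List Int) : 0 ≤ lastNZ xs ∧ lastNZ xs ≤ (xs.length : Int) := by
  induction xs using List.reverseRecOn with
  | nil => simp [lastNZ, PySem.List.enumerate]
  | append_singleton xs x ih =>
    rw [lastNZ_concat]
    by_cases h : x = 0 <;> simp [h] <;> omega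

-- B's single scan + slice = rdropWhile (trailing-zero trim)
theorem take_lastNZ_eq_rdropWhile (xs : List Int) :
    xs.take (lastNZ xs).toNat = List.rdropWhile (fun c => c == 0) xs := by
  induction xs using List.reverseRecOn with
  | nil => simp [lastNZ, PySem.List.enumerate]
  | append_singleton xs x ih =>
    rw [lastNZ_concat, List.rdropWhile_concat]
    by_cases h : x = 0
    · have hle := (lastNZ_nonneg_le xs).2
      have hnn := (lastNZ_nonneg_le xs).1
      rw [if_neg (by simp [h]), if_pos (by simp [h]), ← ih,
        List.take_append_of_le_length (by omega)]
    · rw [if_pos h, if_neg (by simp [h])]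
      have ht : ((xs.length : Int) + 1).toNat = xs.length + 1 := by omega
      rw [ht, List.take_of_length_le (by simp)]

theorem lastNZ_eq_zero_iff (xs : List Int) :
    lastNZ xs = 0 ↔ List.rdropWhile (fun c => c == 0) xs = [] := by
  constructor
  · intro h
    rw [← take_lastNZ_eq_rdropWhile, h]
    simp
  · intro h
    have h2 := take_lastNZ_eq_rdropWhile xs
    rw [h] at h2
    rcases List.take_eq_nil_iff.mp h2 with h3 | h3
    · have := (lastNZ_nonneg_le xs).1; omega
    · subst h3; simp [lastNZ, PySem.List.enumerate]

-- main equality of the two else-branches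
theorem suma_poli_eq (f g : List Int) (p_n : Int) :
    suma_poli f g p_n = suma_poli_alt f g p_n := by
  unfold suma_poli suma_poli_alt
  by_cases hf : f = [0]
  · simp [hf]
  by_cases hg : g = [0]
  · simp [hf, hg]
  simp only [if_neg hf, if_neg hg]
  set F := if f.length < g.length then List.replicate (g.length - f.length) (0 : Int) ++ f else f with hF
  set G := if g.length < f.length then List.replicate (f.length - g.length) (0 : Int) ++ g else g with hG
  have hFlen : F.length = max f.length g.length := by
    rw [hF]; split_ifs with h <;> simp <;> omega
  have hGlen : G.length = max f.length g.length := by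
    rw [hG]; split_ifs with h <;> simp <;> omega
  have hlen : F.length = G.length := by rw [hFlen, hGlen]
  -- A's comprehension as a zipWith
  have hres : (List.range (max f.length g.length)).map
      (fun i => PySem.Int.mod (F.getD i 0 + G.getD i 0) p_n)
      = List.zipWith (fun a b => PySem.Int.mod (a + b) p_n) F G := by
    rw [← hFlen]; exact mapRange_eq_zipWith p_n F G hlen
  -- B's low list is A's comprehension reversed
  have hFrev : F.reverse = f.reverse ++ List.replicate (max f.length g.length - f.length) 0 := by
    rw [hF]; split_ifs with h
    · rw [List.reverse_append, List.reverse_replicate]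
      congr 2; omega
    · have h0 : max f.length g.length - f.length = 0 := by omega
      simp [h0]
  have hGrev : G.reverse = g.reverse ++ List.replicate (max f.length g.length - g.length) 0 := by
    rw [hG]; split_ifs with h
    · rw [List.reverse_append, List.reverse_replicate]
      congr 2; omega
    · have h0 : max f.length g.length - g.length = 0 := by omega
      simp [h0]
  have hmax : max f.reverse.length g.reverse.length = max f.length g.length := by
    simp
  have hlow : sumaLow f.reverse g.reverse p_n
      = (List.zipWith (fun a b => PySem.Int.mod (a + b) p_n) F G).reverse := by
    rw [List.reverse_zipWith hlen, hFrev, hGrev,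
      sumaLow_eq_zipWith_pad p_n f.reverse g.reverse, hmax]
    simp
  set R := List.zipWith (fun a b => PySem.Int.mod (a + b) p_n) F G with hR
  rw [hres, hlow]
  -- trimming: rdropWhile on the reverse = dropWhile, reversed
  have hrd : List.rdropWhile (fun c => c == 0) R.reverse
      = (R.dropWhile (fun c => c == 0)).reverse := by
    simp [List.rdropWhile]
  by_cases hk : lastNZ R.reverse = 0
  · have hempty : R.dropWhile (fun c => c == 0) = [] := by
      have := (lastNZ_eq_zero_iff R.reverse).mp hk
      rw [hrd] at this
      simpa using this
    simp [hk, hempty]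
  · have hne : R.dropWhile (fun c => c == 0) ≠ [] := by
      intro hcon
      exact hk ((lastNZ_eq_zero_iff R.reverse).mpr (by rw [hrd, hcon, List.reverse_nil]))
    rw [if_neg hne, if_neg hk, take_lastNZ_eq_rdropWhile, hrd, List.reverse_reverse]

-- ===== VERDICT (by name: the statement is the Claim_ definition above) =====
theorem suma_poli_spec : Claim_equal_suma_poli := by
  intro f g p_n _ _
  unfold Spec_suma_poli
  exact suma_poli_eq f g p_n
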